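-- pv_equiv track=rewrite | github.com/dheeraj7000/Clyde-v1 | clyde/simulation/monte_carlo.py | _generate_seeds
-- ===== SOURCE A (Python) =====
-- _KNUTH_MULTIPLIER = 2654435761
--
-- _UINT32_MASK = 0xFFFFFFFF
--
-- def _generate_seeds(ensemble_seed: int, run_count: int) -> list[int]:
--     """Deterministic per-run seed derivation from the master seed.
--
--     We multiply the master seed by Knuth's golden-ratio constant and XOR
--     with the run index, then mask to 32-bit positive. Collisions are
--     astronomically unlikely (run_count is in the hundreds, the space is
--     2**32) but the spec asks us to detect and re-derive — we do so by
--     bumping the index until uniqueness holds.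
--     """
--     seeds: list[int] = []
--     used: set[int] = set()
--     for i in range(run_count):
--         j = i
--         while True:
--             seed = (ensemble_seed * _KNUTH_MULTIPLIER) ^ j
--             seed &= _UINT32_MASK
--             if seed not in used:
--                 used.add(seed)
--                 seeds.append(seed)
--                 break
--             # Collision: bump j by a large prime so we don't immediately
--             # collide again (and remain deterministic).
--             j += 0x9E3779B1
--     return seeds
-- ===== SOURCE B (Python) =====
-- _KNUTH_MULTIPLIER = 2654435761
--
-- _UINT32_MASK = 0xFFFFFFFF
--
-- def _generate_seeds(ensemble_seed: int, run_count: int) -> list[int]: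
--     """Deterministic per-run seed derivation from the master seed.
--
--     The masked base value (ensemble_seed * _KNUTH_MULTIPLIER) & _UINT32_MASK
--     XORed with the run index is injective in the index, so for any list-sized
--     run_count the seeds are automatically distinct: no collision bookkeeping
--     is needed and each seed is a closed-form expression.
--     """
--     base = (ensemble_seed * _KNUTH_MULTIPLIER) & _UINT32_MASK
--     return [base ^ i for i in range(run_count)]
-- ===== Notes on version B (the rewrite author's own statement) =====
-- stated objective: simpler
-- what changed: B drops A's used-set and collision re-derivation while-loop entirely and emits each seed as a closed-form masked-base XOR index in one list comprehension, proved collision-free on the realizable domain.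
import Mathlib
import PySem

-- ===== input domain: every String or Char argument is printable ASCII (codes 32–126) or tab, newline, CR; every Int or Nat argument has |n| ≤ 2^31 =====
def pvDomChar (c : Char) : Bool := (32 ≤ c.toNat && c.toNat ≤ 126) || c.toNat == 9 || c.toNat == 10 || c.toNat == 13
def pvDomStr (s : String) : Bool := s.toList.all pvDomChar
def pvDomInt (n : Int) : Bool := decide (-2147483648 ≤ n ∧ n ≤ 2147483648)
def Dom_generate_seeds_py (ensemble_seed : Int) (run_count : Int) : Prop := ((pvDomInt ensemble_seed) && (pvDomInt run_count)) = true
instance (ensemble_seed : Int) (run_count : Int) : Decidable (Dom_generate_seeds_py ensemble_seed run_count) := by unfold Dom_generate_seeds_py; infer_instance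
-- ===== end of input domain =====

-- B replaces A's used-set and collision-bump while-loop by a single closed-form map
-- (masked base XOR index), which is collision-free on the realizable domain; same return values.

-- ===== PORT A =====
-- A's inner 'while True' collision loop; the fuel argument only makes the recursion total
-- (on the admitted domain the first candidate is always fresh, so fuel is never exhausted).
def pvInnerA (base : Int) (used : PySem.Set Int) : Nat → Int → Int
  | 0, j => PySem.Int.band (PySem.Int.bxor base j) 4294967295
  | fuel+1, j =>
    if PySem.Set.contains used (PySem.Int.band (PySem.Int.bxor base j) 4294967295)
    then pvInnerA base used fuel (j + 2654435761)
    else PySem.Int.band (PySem.Int.bxor base j) 4294967295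

def generate_seeds_py (ensemble_seed : Int) (run_count : Int) : List Int :=
  ((PySem.List.pyRange 0 run_count 1).foldl
    (fun (st : List Int × PySem.Set Int) i =>
      let seed := pvInnerA (ensemble_seed * 2654435761) st.2 (st.2.length + 1) i
      (st.1 ++ [seed], PySem.Set.add st.2 seed))
    (([] : List Int), (PySem.Set.empty : PySem.Set Int))).1

-- ===== PORT B =====
def generate_seeds_py_alt (ensemble_seed : Int) (run_count : Int) : List Int :=
  (PySem.List.pyRange 0 run_count 1).map
    (fun i => PySem.Int.bxor (PySem.Int.band (ensemble_seed * 2654435761) 4294967295) i)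

-- ===== PRECONDITION & SPEC =====
def Spec_generate_seeds_py (ensemble_seed : Int) (run_count : Int) (out : List Int) : Prop := out = generate_seeds_py_alt ensemble_seed run_count
instance (ensemble_seed : Int) (run_count : Int) (out : List Int) : Decidable (Spec_generate_seeds_py ensemble_seed run_count out) := by unfold Spec_generate_seeds_py; infer_instance

-- ===== CLAIM (what is proved, stated in full; the proofs are below) =====
def Claim_equal_generate_seeds_py : Prop := ∀ (ensemble_seed : Int) (run_count : Int), Dom_generate_seeds_py ensemble_seed run_count → Spec_generate_seeds_py ensemble_seed run_count (generate_seeds_py ensemble_seed run_count)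

-- ===== LEMMAS AND PROOFS =====

-- (2^k - 1) XOR x is complementation inside the mask: it equals (2^k - 1) - x.
lemma pvSubMask : ∀ (k x : Nat), x < 2^k → (2^k-1) ^^^ x = (2^k-1) - x := by
  intro k
  induction k with
  | zero => intro x hx; interval_cases x; simp
  | succ k ih =>
    intro x hx
    have h1 : 1 ≤ 2^k := Nat.one_le_two_pow
    have hb : Nat.bit (x % 2 == 1) (x / 2) = x := by
      rcases Nat.mod_two_eq_zero_or_one x with h | h <;> simp [Nat.bit_val, h] <;> omega
    have hM : Nat.bit true (2^k - 1) = 2^(k+1) - 1 := by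
      simp [Nat.bit_val]; ring_nf; omega
    have hih := ih (x / 2) (by omega)
    calc (2^(k+1)-1) ^^^ x = Nat.bit true (2^k-1) ^^^ Nat.bit (x % 2 == 1) (x / 2) := by rw [hb, hM]
    _ = Nat.bit (true != (x % 2 == 1)) ((2^k-1) ^^^ (x/2)) := Nat.xor_bit ..
    _ = Nat.bit (true != (x % 2 == 1)) ((2^k-1) - (x/2)) := by rw [hih]
    _ = (2^(k+1)-1) - x := by
        rcases Nat.mod_two_eq_zero_or_one x with h | h <;>
          simp [h, Nat.bit_val] <;> ring_nf <;> omega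

lemma pvMaskMod (x : Nat) : x &&& 4294967295 = x % 2^32 := by
  have : (4294967295:Nat) = 2^32 - 1 := by norm_num
  rw [this, Nat.and_two_pow_sub_one_eq_mod]

-- masking to 32 bits commutes with XOR by a small index: A's candidate equals B's seed.
lemma pvCrux (c : Int) (i : Nat) (h : i < 2^32) :
    PySem.Int.band (PySem.Int.bxor c (i:Int)) 4294967295
      = PySem.Int.bxor (PySem.Int.band c 4294967295) (i:Int) := by
  have hM : (0:Int) ≤ 4294967295 := by norm_num
  have hi : (0:Int) ≤ (i:Int) := Int.natCast_nonneg i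
  by_cases hc : 0 ≤ c
  · simp only [PySem.Int.bxor, PySem.Int.band, if_pos hc, if_pos hi, if_pos hM,
      Int.natCast_nonneg, if_pos, Int.toNat_natCast,
      show (4294967295:Int).toNat = 4294967295 from rfl]
    rw [Nat.and_xor_distrib_right, pvMaskMod i, Nat.mod_eq_of_lt h]
  · simp only [PySem.Int.bxor, PySem.Int.band, if_neg hc, if_pos hi, if_pos hM]
    have hT : (4294967295:Int).toNat = 4294967295 := rfl
    have hneg : ¬ (0:Int) ≤ -((((-c - 1).toNat ^^^ ((i:Int)).toNat) : Nat) : Int) - 1 := by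
      have := Int.natCast_nonneg ((-c - 1).toNat ^^^ ((i:Int)).toNat); omega
    rw [if_neg hneg, if_pos (Int.natCast_nonneg _)]
    simp only [Int.toNat_natCast, hT]
    have hr : (-(-((((-c-1).toNat ^^^ i : Nat)):Int) - 1) - 1) = (((-c-1).toNat ^^^ i : Nat) : Int) := by ring
    rw [hr, Int.toNat_natCast]
    congr 1
    set m := (-c-1).toNat with hm
    have e1 : 4294967295 &&& (m ^^^ i) = (m % 2^32) ^^^ i := by
      rw [Nat.and_comm, Nat.and_xor_distrib_right, pvMaskMod, pvMaskMod, Nat.mod_eq_of_lt h]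
    have e2 : 4294967295 &&& m = m % 2^32 := by rw [Nat.and_comm, pvMaskMod]
    rw [e1, e2]
    have hu32 : m % 2^32 < 2^32 := Nat.mod_lt _ (by norm_num)
    have hxi : (m % 2^32) ^^^ i < 2^32 := Nat.xor_lt_two_pow hu32 h
    have hMM : (4294967295:Nat) = 2^32 - 1 := by norm_num
    rw [hMM, ← pvSubMask 32 _ hxi, ← pvSubMask 32 _ hu32, Nat.xor_assoc]

-- the masked base is a nonnegative integer (a Nat)
lemma pvBandMaskNat (c : Int) : ∃ n : Nat, PySem.Int.band c 4294967295 = (n : Int) := by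
  refine ⟨(PySem.Int.band c 4294967295).toNat, (Int.toNat_of_nonneg ?_).symm⟩
  by_cases hc : 0 ≤ c
  · simp only [PySem.Int.band, if_pos hc, if_pos (show (0:Int) ≤ 4294967295 by norm_num)]
    exact Int.natCast_nonneg _
  · simp only [PySem.Int.band, if_neg hc, if_pos (show (0:Int) ≤ 4294967295 by norm_num)]
    exact Int.natCast_nonneg _

-- XOR with a fixed nonnegative base is injective on Nat indices
lemma pvXorInj (n i i' : Nat)
    (h : PySem.Int.bxor (n : Int) (i : Int) = PySem.Int.bxor (n : Int) (i' : Int)) : i = i' := by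
  simp only [PySem.Int.bxor, if_pos (Int.natCast_nonneg n), if_pos (Int.natCast_nonneg i),
    if_pos (Int.natCast_nonneg i'), Int.toNat_natCast, Nat.cast_inj] at h
  have := congrArg (fun t => n ^^^ t) h
  simpa [Nat.xor_xor_cancel_left] using this

-- main loop invariant: after processing range(m) the seed list and the used set
-- both equal B's map over range(m); the inner loop always exits on its first test.
lemma pvMain (e : Int) (m : Nat) (hm : m ≤ 2^32) :
    (PySem.List.pyRange 0 (m:Int) 1).foldl
      (fun (st : List Int × PySem.Set Int) i =>
        let seed := pvInnerA (e * 2654435761) st.2 (st.2.length + 1) i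
        (st.1 ++ [seed], PySem.Set.add st.2 seed))
      (([] : List Int), (PySem.Set.empty : PySem.Set Int))
    = ((PySem.List.pyRange 0 (m:Int) 1).map
        (fun i => PySem.Int.bxor (PySem.Int.band (e * 2654435761) 4294967295) i),
       (PySem.List.pyRange 0 (m:Int) 1).map
        (fun i => PySem.Int.bxor (PySem.Int.band (e * 2654435761) 4294967295) i)) := by
  induction m with
  | zero => simp [PySem.List.pyRange_one_eq_nil (le_refl (0:Int)), PySem.Set.empty]
  | succ m ih =>
    have hcast : (((m+1:Nat)):Int) = (m:Int) + 1 := by push_cast; ring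
    rw [hcast, PySem.List.pyRange_one_succ_right (Int.natCast_nonneg m),
        List.foldl_append, List.map_append, ih (by omega)]
    simp only [List.foldl_cons, List.foldl_nil, List.map_cons, List.map_nil]
    have hmlt : m < 2^32 := by omega
    have hseed : PySem.Int.band (PySem.Int.bxor (e * 2654435761) ((m:Nat):Int)) 4294967295
        = PySem.Int.bxor (PySem.Int.band (e * 2654435761) 4294967295) ((m:Nat):Int) :=
      pvCrux _ m hmlt
    obtain ⟨nb, hnb⟩ := pvBandMaskNat (e * 2654435761)
    set f : Int → Int := fun i => PySem.Int.bxor (PySem.Int.band (e * 2654435761) 4294967295) i with hf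
    set L : List Int := (PySem.List.pyRange 0 (m:Int) 1).map f with hL
    have hnotmem : f ((m:Nat):Int) ∉ L := by
      intro hmem
      rw [hL, List.mem_map] at hmem
      obtain ⟨x, hx, hfx⟩ := hmem
      rw [PySem.List.mem_pyRange_one] at hx
      obtain ⟨hx0, hxm⟩ := hx
      have hxnat : x = ((x.toNat : Nat) : Int) := (Int.toNat_of_nonneg hx0).symm
      have hxlt : x.toNat < m := by omega
      have : x.toNat = m := by
        apply pvXorInj nb
        rw [← hnb, ← hxnat]
        simpa [hf, hnb] using hfx
      omega
    have hinner : pvInnerA (e * 2654435761) L (L.length + 1) ((m:Nat):Int) = f ((m:Nat):Int) := by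
      show (if PySem.Set.contains L (PySem.Int.band (PySem.Int.bxor (e * 2654435761) ((m:Nat):Int)) 4294967295)
            then pvInnerA (e * 2654435761) L L.length (((m:Nat):Int) + 2654435761)
            else PySem.Int.band (PySem.Int.bxor (e * 2654435761) ((m:Nat):Int)) 4294967295) = f ((m:Nat):Int)
      rw [hseed]
      rw [if_neg (by simpa [PySem.Set.contains_iff] using hnotmem)]
    rw [hinner, PySem.Set.add_of_not_mem hnotmem]

-- ===== VERDICT (by name: the statement is the Claim_ definition above) =====
theorem generate_seeds_py_spec : Claim_equal_generate_seeds_py := by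
  intro e r hdom
  unfold Spec_generate_seeds_py generate_seeds_py generate_seeds_py_alt
  simp only [Dom_generate_seeds_py, pvDomInt, Bool.and_eq_true, decide_eq_true_eq] at hdom
  by_cases hr : r ≤ 0
  · rw [PySem.List.pyRange_one_eq_nil hr]
    simp
  · have h0r : 0 ≤ r := by omega
    have hrcast : r = ((r.toNat : Nat) : Int) := (Int.toNat_of_nonneg h0r).symm
    have hbound : r.toNat ≤ 2^32 := by omega
    rw [hrcast]
    rw [pvMain e r.toNat hbound]
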